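-- pv_equiv track=rewrite | github.com/leila100/coding-exercises | python/MikeSearles/FilteringSignals.py | countSignals
-- ===== SOURCE A (Python) =====
-- def countSignals(frequencies, filterRanges):
--   # f = max(frequencies)
--   min_max = {"min": filterRanges[0][0], "max": filterRanges[0][1]}
--   for i in filterRanges:
--     if i[0] > min_max["min"]:
--       min_max["min"] = i[0]
--     if i[1] < min_max["max"]:
--       min_max["max"] = i[1]
--   count = 0
--   freqSet = set(frequencies)
--   for i in range(min_max["min"], min_max['max'] + 1 ):
--     # if i in frequencies:
--     if i in freqSet:
--       count += frequencies.count(i)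
--   return count
-- ===== SOURCE B (Python) =====
-- def countSignals(frequencies, filterRanges):
--     low = max(r[0] for r in filterRanges)
--     high = min(r[1] for r in filterRanges)
--     return sum(low <= f <= high for f in frequencies)
-- ===== Notes on version B (the rewrite author's own statement) =====
-- stated objective: faster
-- what changed: Instead of building a set and iterating every integer in the intersected range calling frequencies.count on each hit, B computes the intersection bounds with max/min and counts the in-range frequencies in one pass over the list.
import Mathlib
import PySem

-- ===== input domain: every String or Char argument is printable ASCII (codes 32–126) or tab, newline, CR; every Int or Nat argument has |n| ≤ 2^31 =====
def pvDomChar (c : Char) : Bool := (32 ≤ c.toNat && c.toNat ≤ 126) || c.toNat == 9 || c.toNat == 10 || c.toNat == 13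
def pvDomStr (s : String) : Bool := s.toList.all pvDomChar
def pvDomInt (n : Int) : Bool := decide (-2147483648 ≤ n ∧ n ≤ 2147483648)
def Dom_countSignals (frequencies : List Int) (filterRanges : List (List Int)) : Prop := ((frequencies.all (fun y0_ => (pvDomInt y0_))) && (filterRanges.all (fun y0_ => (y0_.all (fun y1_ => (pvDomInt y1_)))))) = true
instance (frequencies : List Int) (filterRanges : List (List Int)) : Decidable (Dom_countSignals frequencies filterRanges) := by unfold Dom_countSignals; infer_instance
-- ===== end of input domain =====

-- B replaces A's scan over every integer of the intersected range (with count() per hit)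
-- by max/min over the bounds and one in-range counting pass over frequencies (faster).

-- ===== PORT A =====
def countSignals (frequencies : List Int) (filterRanges : List (List Int)) : Int :=
  let min_max : PySem.Dict String Int :=
    PySem.Dict.ofList
      [("min", PySem.List.pyGetD (PySem.List.pyGetD filterRanges 0 []) 0 0),
       ("max", PySem.List.pyGetD (PySem.List.pyGetD filterRanges 0 []) 1 0)]
  let min_max := filterRanges.foldl (fun mm i =>
    let mm := if PySem.List.pyGetD i 0 0 > mm.getD "min" 0
              then mm.insert "min" (PySem.List.pyGetD i 0 0) else mm
    if PySem.List.pyGetD i 1 0 < mm.getD "max" 0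
    then mm.insert "max" (PySem.List.pyGetD i 1 0) else mm) min_max
  let freqSet : PySem.Set Int := PySem.Set.ofList frequencies
  (PySem.List.pyRange (min_max.getD "min" 0) (min_max.getD "max" 0 + 1) 1).foldl
    (fun count i => if i ∈ freqSet then count + (frequencies.count i : Int) else count) 0

-- ===== PORT B =====
def countSignals_alt (frequencies : List Int) (filterRanges : List (List Int)) : Int :=
  let low := (PySem.List.max? (filterRanges.map (fun r => PySem.List.pyGetD r 0 0)) (fun x => x)).getD 0
  let high := (PySem.List.min? (filterRanges.map (fun r => PySem.List.pyGetD r 1 0)) (fun x => x)).getD 0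
  (frequencies.map (fun f => if low ≤ f ∧ f ≤ high then (1 : Int) else 0)).sum

-- ===== PRECONDITION & SPEC =====
-- A raises IndexError when filterRanges is empty (filterRanges[0]) or some range has
-- fewer than two entries (i[0]/i[1]); exactly those inputs are excluded.
def Pre_countSignals (frequencies : List Int) (filterRanges : List (List Int)) : Prop :=
  filterRanges ≠ [] ∧ ∀ r ∈ filterRanges, 2 ≤ r.length
instance (frequencies : List Int) (filterRanges : List (List Int)) : Decidable (Pre_countSignals frequencies filterRanges) := by unfold Pre_countSignals; infer_instance
def pvWitness_countSignals : List Int × List (List Int) := ([1, 2, 3, 4, 5], [[1, 3], [2, 5]])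
def Spec_countSignals (frequencies : List Int) (filterRanges : List (List Int)) (out : Int) : Prop := out = countSignals_alt frequencies filterRanges
instance (frequencies : List Int) (filterRanges : List (List Int)) (out : Int) : Decidable (Spec_countSignals frequencies filterRanges out) := by unfold Spec_countSignals; infer_instance

-- ===== CLAIM (what is proved, stated in full; the proofs are below) =====
def Claim_equal_countSignals : Prop := ∀ (frequencies : List Int) (filterRanges : List (List Int)), Dom_countSignals frequencies filterRanges → Pre_countSignals frequencies filterRanges → Spec_countSignals frequencies filterRanges (countSignals frequencies filterRanges)

-- ===== LEMMAS AND PROOFS =====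

-- abbreviation for A's two-key dict state
def pvMM (a b : Int) : PySem.Dict String Int :=
  PySem.Dict.ofList [("min", a), ("max", b)]

theorem pvMM_getD_min (a b : Int) : (pvMM a b).getD "min" 0 = a := rfl
theorem pvMM_getD_max (a b : Int) : (pvMM a b).getD "max" 0 = b := rfl
theorem pvMM_insert_min (a b v : Int) : (pvMM a b).insert "min" v = pvMM v b := rfl
theorem pvMM_insert_max (a b v : Int) : (pvMM a b).insert "max" v = pvMM a v := rfl

-- A's loop over filterRanges is a running max of the lows and min of the highs
theorem pvLoopA (rs : List (List Int)) (a b : Int) :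
    rs.foldl (fun mm i =>
      let mm := if PySem.List.pyGetD i 0 0 > mm.getD "min" 0
                then mm.insert "min" (PySem.List.pyGetD i 0 0) else mm
      if PySem.List.pyGetD i 1 0 < mm.getD "max" 0
      then mm.insert "max" (PySem.List.pyGetD i 1 0) else mm) (pvMM a b)
    = pvMM (rs.foldl (fun x r => max x (PySem.List.pyGetD r 0 0)) a)
           (rs.foldl (fun x r => min x (PySem.List.pyGetD r 1 0)) b) := by
  induction rs generalizing a b with
  | nil => rfl
  | cons r t ih =>
    simp only [List.foldl_cons]
    have hstep :
        (let mm := if PySem.List.pyGetD r 0 0 > (pvMM a b).getD "min" 0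
                   then (pvMM a b).insert "min" (PySem.List.pyGetD r 0 0) else pvMM a b
         if PySem.List.pyGetD r 1 0 < mm.getD "max" 0
         then mm.insert "max" (PySem.List.pyGetD r 1 0) else mm)
        = pvMM (max a (PySem.List.pyGetD r 0 0)) (min b (PySem.List.pyGetD r 1 0)) := by
      simp only [pvMM_getD_min, pvMM_insert_min]
      split_ifs with h1 h2 h2 <;>
        (try simp only [pvMM_getD_max, pvMM_insert_max] at *) <;>
        (congr 1 <;> omega)
    rw [hstep, ih]

-- sum over a duplicate-free list of the indicator of one value
theorem pvSumIndicator (R : List Int) (hR : R.Nodup) (a : Int) :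
    (R.map (fun i => if a = i then (1 : Int) else 0)).sum = if a ∈ R then 1 else 0 := by
  induction R with
  | nil => simp
  | cons x t ih =>
    rcases List.nodup_cons.mp hR with ⟨hx, ht⟩
    by_cases hax : a = x
    · subst hax
      simp [ih ht, hx]
    · simp [hax, ih ht]

-- summed counts over a duplicate-free index list = membership count
theorem pvSumCount (l R : List Int) (hR : R.Nodup) :
    (R.map (fun i => (l.count i : Int))).sum = (l.countP (fun f => decide (f ∈ R)) : Int) := by
  induction l with
  | nil => simp
  | cons a t ih =>
    have hcnt : ∀ i : Int, ((a :: t).count i : Int)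
        = (t.count i : Int) + (if a = i then 1 else 0) := by
      intro i
      by_cases h : a = i <;> simp [h]
    have : (R.map (fun i => ((a :: t).count i : Int))).sum
        = (R.map (fun i => (t.count i : Int))).sum
          + (R.map (fun i => if a = i then (1 : Int) else 0)).sum := by
      rw [← List.sum_map_add]
      exact congrArg List.sum (List.map_congr_left (fun i _ => hcnt i))
    rw [this, ih, pvSumIndicator R hR a]
    by_cases hmem : a ∈ R <;> simp [hmem]

-- ===== VERDICT (by name: the statement is the Claim_ definition above) =====
theorem countSignals_spec : Claim_equal_countSignals := by
  intro frequencies filterRanges _ hpre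
  obtain ⟨hne, hlen⟩ := hpre
  unfold Spec_countSignals countSignals countSignals_alt
  obtain ⟨r0, rs, rfl⟩ := List.exists_cons_of_ne_nil hne
  simp only [PySem.List.pyGetD_zero_cons]
  -- A's bounds loop
  rw [show (PySem.Dict.ofList [("min", PySem.List.pyGetD r0 0 0), ("max", PySem.List.pyGetD r0 1 0)])
        = pvMM (PySem.List.pyGetD r0 0 0) (PySem.List.pyGetD r0 1 0) from rfl,
      pvLoopA]
  simp only [List.foldl_cons, max_self, min_self, pvMM_getD_min, pvMM_getD_max]
  -- B's bounds
  rw [List.map_cons, List.map_cons, PySem.List.max?_id_cons, PySem.List.min?_id_cons]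
  simp only [Option.getD_some]
  set lo := rs.foldl (fun x r => max x (PySem.List.pyGetD r 0 0)) (PySem.List.pyGetD r0 0 0) with hlo
  set hi := rs.foldl (fun x r => min x (PySem.List.pyGetD r 1 0)) (PySem.List.pyGetD r0 1 0) with hhi
  have hfoldmax : (rs.map (fun r => PySem.List.pyGetD r 0 0)).foldl max (PySem.List.pyGetD r0 0 0) = lo := by
    rw [hlo, List.foldl_map]
  have hfoldmin : (rs.map (fun r => PySem.List.pyGetD r 1 0)).foldl min (PySem.List.pyGetD r0 1 0) = hi := by
    rw [hhi, List.foldl_map]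
  rw [hfoldmax, hfoldmin]
  -- A's counting loop: drop the redundant set-membership guard
  have hguard : (PySem.List.pyRange lo (hi + 1) 1).foldl
      (fun count i => if i ∈ PySem.Set.ofList frequencies then count + (frequencies.count i : Int) else count) 0
      = (PySem.List.pyRange lo (hi + 1) 1).foldl
      (fun count i => count + (frequencies.count i : Int)) 0 := by
    apply PySem.List.foldl_congr_mem
    intro acc x _
    by_cases h : x ∈ frequencies
    · simp [PySem.Set.mem_ofList, h]
    · simp [PySem.Set.mem_ofList, h, List.count_eq_zero_of_not_mem h]
  rw [hguard, PySem.List.foldl_add, zero_add,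
      pvSumCount frequencies (PySem.List.pyRange lo (hi + 1) 1) (PySem.List.nodup_pyRange_one lo (hi + 1))]
  -- both sides count the frequencies lying in [lo, hi]
  have hcong : frequencies.countP (fun f => decide (f ∈ PySem.List.pyRange lo (hi + 1) 1))
      = frequencies.countP (fun f => decide (lo ≤ f ∧ f ≤ hi)) := by
    apply List.countP_congr
    intro f _
    simp [PySem.List.mem_pyRange_one]
  rw [hcong, ← PySem.List.sum_map_ite_one_zero (fun f => decide (lo ≤ f ∧ f ≤ hi)) frequencies]
  exact congrArg List.sum (List.map_congr_left (fun f _ => by simp))
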